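-- pv_equiv track=rewrite | github.com/lamaper/VulnBooster | gvi_causalcode/preprocess-lstm/pattern.py | For2WhileReplacePos
-- ===== SOURCE A (Python) =====
-- def _go4next(tokens, token, curIdx):
--     """
--     功能：向后探测。从当前索引 curIdx 开始，向后寻找指定的 token（例如寻找下一个分号 ";"）。
--     返回：目标 token 所在的索引位置。如果一直找到底都没找到，则返回 -1。
--     """
--     n = len(tokens)
--     while curIdx < n and tokens[curIdx] != token:
--         curIdx += 1
--     if curIdx == n:
--         return -1
--     else:
--         return curIdx
--
-- def _go4match(tokens, startToken, curIdx):
--     endToken = ""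
--     if startToken == "(":
--         endToken = ")"
--     elif startToken == "[":
--         endToken = "]"
--     elif startToken == "{":
--         endToken = "}"
--     else:
--         assert False
--
--     indent = 0
--     n = len(tokens)
--
--     # 记录初始位置防死循环
--     start_idx = curIdx
--
--     while curIdx < n:
--         if tokens[curIdx] == startToken:
--             indent += 1
--         elif tokens[curIdx] == endToken:
--             indent -= 1
--             if indent == 0:
--                 break
--         curIdx += 1
--
--     # 【修复】：如果一直找到结尾也没找到匹配的括号，
--     # 不要返回 -1，而是强行返回当前索引的下一个位置，逼迫解析器继续前进，防止卡死
--     if curIdx == n: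
--         return min(start_idx + 1, n)
--     else:
--         return curIdx
--
-- def For2WhileReplacePos(tokens, endPoses):
--     """寻找 `for` 循环语句的位置及其关键组件的边界索引"""
--     pos =[]
--     for i, t in enumerate(tokens):
--         if t == "for":
--             forIdx = i
--             # 找到 for 循环条件部分的右括号 `)` 位置
--             conditionEndIdx = _go4match(tokens, "(", forIdx)
--
--             # 确定 for 循环体的结尾位置
--             if tokens[conditionEndIdx + 1] == "{":
--                 blockForEndIdx = _go4match(tokens, "{", conditionEndIdx)
--             else:
--                 # 如果没有大括号（单行循环），利用之前算好的 endPoses 找到这句单行代码在哪结束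
--                 blockForEndIdx = endPoses[conditionEndIdx + 1]
--
--             # 在 for(A; B; C) 中找到两处分号的位置，用来切分条件 A、B、C
--             condition1EndIdx = _go4next(tokens, ";", forIdx)
--             condition2EndIdx = _go4next(tokens, ";", condition1EndIdx + 1)
--
--             pos.append([forIdx, condition1EndIdx, condition2EndIdx, conditionEndIdx, blockForEndIdx])
--     return pos
-- ===== SOURCE B (Python) =====
-- def For2WhileReplacePos(tokens, endPoses):
--     """A right-to-left pass precomputes, for every start index, the next
--     semicolon and the balance-matching ')' / '}' positions; each 'for' is
--     then answered by array lookups instead of rescanning the suffix."""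
--     n = len(tokens)
--     # prefix balances: dPar[k] = #'(' - #')' among tokens[:k]; dBr likewise for braces
--     dPar = [0]
--     dBr = [0]
--     for t in tokens:
--         dPar.append(dPar[-1] + (1 if t == "(" else (-1 if t == ")" else 0)))
--         dBr.append(dBr[-1] + (1 if t == "{" else (-1 if t == "}" else 0)))
--     # right-to-left pass: for each s, first ';' at >= s, and the first j >= s
--     # with tokens[j] == ')' and dPar[j+1] == dPar[s] (i.e. where a scan that
--     # starts counting at s sees the bracket level return to zero); same for braces
--     semis, pars, brs = [], [], []
--     mPar, mBr, semi = {}, {}, -1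
--     for s in range(n - 1, -1, -1):
--         t = tokens[s]
--         if t == ";":
--             semi = s
--         elif t == ")":
--             mPar[dPar[s + 1]] = s
--         elif t == "}":
--             mBr[dBr[s + 1]] = s
--         semis.append(semi)
--         pars.append(mPar.get(dPar[s], -1))
--         brs.append(mBr.get(dBr[s], -1))
--     nextSemi = list(reversed(semis)) + [-1]
--     ansPar = list(reversed(pars)) + [-1]
--     ansBr = list(reversed(brs)) + [-1]
--     pos = []
--     for i, t in enumerate(tokens):
--         if t == "for":
--             conditionEndIdx = ansPar[i]
--             if conditionEndIdx == -1:
--                 conditionEndIdx = i + 1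
--             if tokens[conditionEndIdx + 1] == "{":
--                 blockForEndIdx = ansBr[conditionEndIdx]
--                 if blockForEndIdx == -1:
--                     blockForEndIdx = conditionEndIdx + 1
--             else:
--                 blockForEndIdx = endPoses[conditionEndIdx + 1]
--             condition1EndIdx = nextSemi[i]
--             condition2EndIdx = nextSemi[condition1EndIdx + 1]
--             pos.append([i, condition1EndIdx, condition2EndIdx, conditionEndIdx, blockForEndIdx])
--     return pos
-- ===== Notes on version B (the rewrite author's own statement) =====
-- stated objective: alternative
-- what changed: A rescans the token list forward from every `for` (to find the matching ')', the body '}' and the next semicolons); B makes one left-to-right pass for prefix bracket balances and one right-to-left pass building next-semicolon and balance-matching suffix arrays, then answers every `for` by array lookups.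
import Mathlib
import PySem

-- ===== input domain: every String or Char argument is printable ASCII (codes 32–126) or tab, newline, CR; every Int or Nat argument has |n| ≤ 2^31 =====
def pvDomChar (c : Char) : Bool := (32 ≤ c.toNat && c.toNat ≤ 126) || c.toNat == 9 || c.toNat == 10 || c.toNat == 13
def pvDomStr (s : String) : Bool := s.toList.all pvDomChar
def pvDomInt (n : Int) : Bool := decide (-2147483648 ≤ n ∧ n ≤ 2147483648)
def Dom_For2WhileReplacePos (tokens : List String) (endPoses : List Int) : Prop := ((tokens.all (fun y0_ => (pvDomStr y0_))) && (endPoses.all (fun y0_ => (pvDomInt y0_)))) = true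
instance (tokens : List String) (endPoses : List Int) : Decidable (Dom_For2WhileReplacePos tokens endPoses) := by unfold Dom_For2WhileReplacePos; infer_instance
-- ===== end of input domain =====

-- B replaces A's per-`for` forward rescans by a right-to-left precomputation of
-- next-semicolon and balance-matching bracket positions, answered by array lookups;
-- equality of the RETURN value is proved on Pre_ (exactly where A raises no IndexError).

-- ===== PORT A =====
-- _go4next: while-loop as recursion on the remaining distance
def go4next (tokens : List String) (token : String) (curIdx : Int) : Int :=
  if h : curIdx < (tokens.length : Int) ∧ ¬ (PySem.List.pyGetD tokens curIdx "" = token) then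
    go4next tokens token (curIdx + 1)
  else if curIdx = (tokens.length : Int) then -1 else curIdx
  termination_by ((tokens.length : Int) - curIdx).toNat
  decreasing_by omega

-- the while-loop of _go4match (indent/curIdx are the Python loop state)
def go4matchLoop (tokens : List String) (startToken endToken : String) (indent curIdx : Int) : Int :=
  if h : curIdx < (tokens.length : Int) then
    if PySem.List.pyGetD tokens curIdx "" = startToken then
      go4matchLoop tokens startToken endToken (indent + 1) (curIdx + 1)
    else if PySem.List.pyGetD tokens curIdx "" = endToken then
      (if indent - 1 = 0 then curIdx
       else go4matchLoop tokens startToken endToken (indent - 1) (curIdx + 1))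
    else go4matchLoop tokens startToken endToken indent (curIdx + 1)
  else curIdx
  termination_by ((tokens.length : Int) - curIdx).toNat
  decreasing_by all_goals omega

-- _go4match (the `assert False` branch is unreachable from the entry: startToken is "(" or "{")
def go4match (tokens : List String) (startToken : String) (curIdx : Int) : Int :=
  let endToken := if startToken = "(" then ")" else if startToken = "[" then "]"
                  else if startToken = "{" then "}" else ""
  let r := go4matchLoop tokens startToken endToken 0 curIdx
  if r = (tokens.length : Int) then min (curIdx + 1) (tokens.length : Int) else r

def For2WhileReplacePos (tokens : List String) (endPoses : List Int) : List (List Int) :=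
  (PySem.List.enumerate tokens).foldl (fun pos it =>
    if it.2 = "for" then
      let forIdx := it.1
      let conditionEndIdx := go4match tokens "(" forIdx
      let blockForEndIdx :=
        if PySem.List.pyGetD tokens (conditionEndIdx + 1) "" = "{" then
          go4match tokens "{" conditionEndIdx
        else
          PySem.List.pyGetD endPoses (conditionEndIdx + 1) 0
      let condition1EndIdx := go4next tokens ";" forIdx
      let condition2EndIdx := go4next tokens ";" (condition1EndIdx + 1)
      pos ++ [[forIdx, condition1EndIdx, condition2EndIdx, conditionEndIdx, blockForEndIdx]]
    else pos) []

-- ===== PORT B =====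
def pvDelta (a b t : String) : Int := if t = a then 1 else if t = b then -1 else 0

-- prefix balances: the Python loop appending dPar[-1] + delta
def prefs (a b : String) (acc : Int) : List String → List Int
  | [] => [acc]
  | t :: ts => acc :: prefs a b (acc + pvDelta a b t) ts

structure BackSt where
  semis : List Int
  pars  : List Int
  brs   : List Int
  mPar  : PySem.Dict Int Int
  mBr   : PySem.Dict Int Int
  semi  : Int

-- one iteration of the right-to-left loop (index s)
def backStep (tokens : List String) (dPar dBr : List Int) (s : Nat) (st : BackSt) : BackSt :=
  let t := tokens.getD s ""
  let semi' := if t = ";" then (s : Int) else st.semi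
  let mPar' := if t = ")" then st.mPar.insert (dPar.getD (s+1) 0) (s : Int) else st.mPar
  let mBr'  := if t = "}" then st.mBr.insert (dBr.getD (s+1) 0) (s : Int) else st.mBr
  { semis := st.semis ++ [semi'],
    pars  := st.pars ++ [mPar'.getD (dPar.getD s 0) (-1)],
    brs   := st.brs ++ [mBr'.getD (dBr.getD s 0) (-1)],
    mPar  := mPar', mBr := mBr', semi := semi' }

-- `for s in range(n-1, -1, -1)`: backPass s has processed indices n-1 … s
def backPass (tokens : List String) (dPar dBr : List Int) (s : Nat) : BackSt :=
  if h : s < tokens.length then backStep tokens dPar dBr s (backPass tokens dPar dBr (s + 1))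
  else ⟨[], [], [], PySem.Dict.empty, PySem.Dict.empty, -1⟩
  termination_by tokens.length - s

def For2WhileReplacePos_alt (tokens : List String) (endPoses : List Int) : List (List Int) :=
  let dPar := prefs "(" ")" 0 tokens
  let dBr := prefs "{" "}" 0 tokens
  let st := backPass tokens dPar dBr 0
  let nextSemi := st.semis.reverse ++ [-1]
  let ansPar := st.pars.reverse ++ [-1]
  let ansBr := st.brs.reverse ++ [-1]
  (PySem.List.enumerate tokens).foldl (fun pos it =>
    if it.2 = "for" then
      let i := it.1
      let cE0 := PySem.List.pyGetD ansPar i (-1)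
      let conditionEndIdx := if cE0 = -1 then i + 1 else cE0
      let blockForEndIdx :=
        if PySem.List.pyGetD tokens (conditionEndIdx + 1) "" = "{" then
          let bE0 := PySem.List.pyGetD ansBr conditionEndIdx (-1)
          if bE0 = -1 then conditionEndIdx + 1 else bE0
        else
          PySem.List.pyGetD endPoses (conditionEndIdx + 1) 0
      let condition1EndIdx := PySem.List.pyGetD nextSemi i (-1)
      let condition2EndIdx := PySem.List.pyGetD nextSemi (condition1EndIdx + 1) (-1)
      pos ++ [[i, condition1EndIdx, condition2EndIdx, conditionEndIdx, blockForEndIdx]]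
    else pos) []

-- ===== PRECONDITION & SPEC =====
-- declarative helpers for Pre_: prefix bracket balance and "first index ≥ s with property"
def pvBal (a b : String) (tokens : List String) (k : Nat) : Int :=
  ((tokens.take k).count a : Int) - ((tokens.take k).count b : Int)

def pvFirstAux : Nat → (Nat → Bool) → Nat → Option Nat
  | 0, _, _ => none
  | fuel + 1, p, s => if p s then some s else pvFirstAux fuel p (s + 1)

def pvFirst (n : Nat) (p : Nat → Bool) (s : Nat) : Option Nat := pvFirstAux (n - s) p s

-- where A's `_go4match(tokens, "(", i)` ends up: the first j ≥ i where a `)` returns the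
-- running bracket balance to its value at i, else the fallback i+1
def pvCondEnd (tokens : List String) (i : Nat) : Int :=
  match pvFirst tokens.length
      (fun j => tokens.getD j "" == ")" &&
        decide (pvBal "(" ")" tokens (j + 1) = pvBal "(" ")" tokens i)) i with
  | some j => (j : Int)
  | none => (i : Int) + 1

-- Pre_ excludes exactly the inputs on which A raises an IndexError: some `for` at i whose
-- condition end cE has cE+1 out of range of tokens, or (no `{` there) out of range of endPoses.
def Pre_For2WhileReplacePos (tokens : List String) (endPoses : List Int) : Prop :=
  ∀ i < tokens.length, tokens.getD i "" = "for" →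
    pvCondEnd tokens i + 1 < (tokens.length : Int) ∧
    (tokens.getD (pvCondEnd tokens i + 1).toNat "" ≠ "{" →
      pvCondEnd tokens i + 1 < (endPoses.length : Int))

instance (tokens : List String) (endPoses : List Int) : Decidable (Pre_For2WhileReplacePos tokens endPoses) := by
  unfold Pre_For2WhileReplacePos; infer_instance

def pvWitness_For2WhileReplacePos : List String × List Int :=
  (["for", "(", ";", ";", ")", "{", "x", "}"], [])

def Spec_For2WhileReplacePos (tokens : List String) (endPoses : List Int) (out : List (List Int)) : Prop := out = For2WhileReplacePos_alt tokens endPoses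
instance (tokens : List String) (endPoses : List Int) (out : List (List Int)) : Decidable (Spec_For2WhileReplacePos tokens endPoses out) := by unfold Spec_For2WhileReplacePos; infer_instance

-- ===== CLAIM (what is proved, stated in full; the proofs are below) =====
def Claim_equal_For2WhileReplacePos : Prop := ∀ (tokens : List String) (endPoses : List Int), Dom_For2WhileReplacePos tokens endPoses → Pre_For2WhileReplacePos tokens endPoses → Spec_For2WhileReplacePos tokens endPoses (For2WhileReplacePos tokens endPoses)

-- ===== LEMMAS AND PROOFS =====
def pvOI : Option Nat → Int
  | some j => (j : Int)
  | none => -1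

def pSemi (tokens : List String) (j : Nat) : Bool := tokens.getD j "" == ";"

def pMatch (a b : String) (tokens : List String) (l : Int) (j : Nat) : Bool :=
  tokens.getD j "" == b && decide (pvBal a b tokens (j + 1) = l)

lemma pvFirst_aux_none (n : Nat) (p : Nat → Bool) (s : Nat) (h : n ≤ s) : pvFirst n p s = none := by
  unfold pvFirst
  rw [Nat.sub_eq_zero_of_le h, pvFirstAux]

-- the one-step recurrence of pvFirst (it is defined by fuel so that `decide` can evaluate it)
lemma pvFirst_eq (n : Nat) (p : Nat → Bool) (s : Nat) :
    pvFirst n p s = if s < n then (if p s then some s else pvFirst n p (s + 1)) else none := by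
  unfold pvFirst
  cases hm : n - s with
  | zero =>
    rw [if_neg (by omega)]
    rfl
  | succ m =>
    rw [if_pos (by omega)]
    show (if p s then some s else pvFirstAux m p (s + 1)) = _
    have : n - (s + 1) = m := by omega
    rw [this]

lemma pvFirst_congr (n : Nat) (p q : Nat → Bool) (s : Nat) (h : ∀ j, p j = q j) :
    pvFirst n p s = pvFirst n q s := by
  induction hm : n - s generalizing s with
  | zero => rw [pvFirst_aux_none, pvFirst_aux_none] <;> omega
  | succ m ih =>
    have hs : s < n := by omega
    rw [pvFirst_eq]; conv_rhs => rw [pvFirst_eq]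
    simp only [if_pos hs, h s]
    by_cases hq : q s = true
    · simp [hq]
    · simp only [Bool.not_eq_true] at hq
      simp only [hq, Bool.false_eq_true, if_false]
      exact ih (s + 1) (by omega)

lemma pvFirst_some_bounds (n : Nat) (p : Nat → Bool) (s j : Nat)
    (h : pvFirst n p s = some j) : s ≤ j ∧ j < n ∧ p j = true := by
  induction hm : n - s generalizing s with
  | zero => rw [pvFirst_aux_none n p s (by omega)] at h; exact absurd h (by simp)
  | succ m ih =>
    have hs : s < n := by omega
    rw [pvFirst_eq] at h
    simp only [if_pos hs] at h
    by_cases hp : p s = true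
    · simp only [hp, if_true] at h
      obtain rfl : s = j := by simpa using h
      exact ⟨le_refl _, hs, hp⟩
    · simp only [Bool.not_eq_true] at hp
      simp only [hp, Bool.false_eq_true, if_false] at h
      have := ih (s + 1) h (by omega)
      exact ⟨by omega, this.2.1, this.2.2⟩

lemma prefs_getD (a b : String) (hab : a ≠ b) (ts : List String) (acc : Int) (k : Nat)
    (hk : k ≤ ts.length) : (prefs a b acc ts).getD k 0 = acc + pvBal a b ts k := by
  induction ts generalizing acc k with
  | nil =>
    obtain rfl : k = 0 := by simpa using hk
    simp [prefs, pvBal]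
  | cons t ts ih =>
    cases k with
    | zero => simp [prefs, pvBal]
    | succ k =>
      simp only [prefs, List.getD_cons_succ]
      rw [ih (acc + pvDelta a b t) k (by simpa using hk)]
      have : pvBal a b (t :: ts) (k + 1) = pvDelta a b t + pvBal a b ts k := by
        simp only [pvBal, List.take_succ_cons, List.count_cons, pvDelta]
        by_cases h1 : t = a
        · subst h1
          simp [beq_iff_eq, hab]
          ring
        · by_cases h2 : t = b
          · subst h2
            simp [beq_iff_eq, h1]
            ring
          · simp [beq_iff_eq, h1, h2]
      rw [this]; ring

lemma pvBal_succ (a b : String) (hab : a ≠ b) (tokens : List String) (k : Nat) (hk : k < tokens.length) :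
    pvBal a b tokens (k + 1) = pvBal a b tokens k + pvDelta a b (tokens.getD k "") := by
  set x := tokens.getD k "" with hx
  have ht : tokens.take (k + 1) = tokens.take k ++ [x] := by
    rw [hx, List.getD_eq_getElem tokens "" hk]
    rw [List.take_add_one, List.getElem?_eq_getElem hk]
    rfl
  simp only [pvBal, ht, List.count_append, pvDelta]
  by_cases h1 : x = a
  · have h2 : ¬ x = b := by rw [h1]; exact hab
    simp only [h1, List.count_singleton, beq_iff_eq, hab, if_false, if_true,
      List.count_eq_zero_of_not_mem (by simp [Ne.symm hab] : b ∉ [a])]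
    push_cast; ring
  · by_cases h2 : x = b
    · simp only [h2, List.count_singleton, beq_iff_eq, if_true,
        List.count_eq_zero_of_not_mem (by simp [hab] : a ∉ [b])]
      have : ¬ b = a := Ne.symm hab
      simp [this]
      ring
    · simp [h1, h2]

lemma go4next_eq (tokens : List String) (tok : String) (c : Int) (h0 : 0 ≤ c)
    (hn : c ≤ (tokens.length : Int)) :
    go4next tokens tok c = pvOI (pvFirst tokens.length (fun j => tokens.getD j "" == tok) c.toNat) := by
  induction hm : ((tokens.length : Int) - c).toNat generalizing c with
  | zero =>
    have hc : c = (tokens.length : Int) := by omega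
    rw [go4next, dif_neg (by rw [not_and]; intro h; omega)]
    rw [if_pos hc, pvFirst_aux_none _ _ _ (by omega)]
    rfl
  | succ m ih =>
    have hs : c < (tokens.length : Int) := by omega
    have hsN : c.toNat < tokens.length := by omega
    have hget : PySem.List.pyGetD tokens c "" = tokens.getD c.toNat "" :=
      PySem.List.pyGetD_of_nonneg tokens "" h0
    rw [go4next]
    conv_rhs => rw [pvFirst_eq]
    simp only [if_pos hsN, hget]
    set x := tokens.getD c.toNat "" with hx
    by_cases ht : x = tok
    · rw [dif_neg (by rw [not_and]; intro _ h; exact h ht)]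
      rw [if_neg (by omega)]
      have hb : (x == tok) = true := by simp [ht]
      simp only [hb, if_true, pvOI]
      omega
    · rw [dif_pos ⟨hs, ht⟩]
      have hb : (x == tok) = false := by simp [ht]
      simp only [hb, Bool.false_eq_true, if_false]
      have h1 : (c + 1).toNat = c.toNat + 1 := by omega
      rw [ih (c + 1) (by omega) (by omega) (by omega), h1]

lemma go4matchLoop_eq (tokens : List String) (a b : String) (hab : a ≠ b) (K ind c : Int)
    (h0 : 0 ≤ c) (hn : c ≤ (tokens.length : Int))
    (hK : ind = K + pvBal a b tokens c.toNat) :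
    go4matchLoop tokens a b ind c =
      (match pvFirst tokens.length
          (fun j => tokens.getD j "" == b && decide (K + pvBal a b tokens (j + 1) = 0)) c.toNat with
       | some j => (j : Int)
       | none => (tokens.length : Int)) := by
  induction hm : ((tokens.length : Int) - c).toNat generalizing ind c with
  | zero =>
    have hc : c = (tokens.length : Int) := by omega
    rw [go4matchLoop, dif_neg (by omega), pvFirst_aux_none _ _ _ (by omega)]
    exact hc
  | succ m ih =>
    have hs : c < (tokens.length : Int) := by omega
    have hsN : c.toNat < tokens.length := by omega
    have hc1 : (c + 1).toNat = c.toNat + 1 := by omega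
    have hget : PySem.List.pyGetD tokens c "" = tokens.getD c.toNat "" :=
      PySem.List.pyGetD_of_nonneg tokens "" h0
    have hbal : pvBal a b tokens (c.toNat + 1)
        = pvBal a b tokens c.toNat + pvDelta a b (tokens.getD c.toNat "") :=
      pvBal_succ a b hab tokens c.toNat hsN
    rw [go4matchLoop, dif_pos hs]
    conv_rhs => rw [pvFirst_eq]
    simp only [if_pos hsN, hget]
    by_cases h1 : tokens.getD c.toNat "" = a
    · have hpb : (tokens.getD c.toNat "" == b) = false := by
        rw [h1, beq_eq_false_iff_ne]; exact hab
      simp only [if_pos h1, hpb, Bool.false_and, Bool.false_eq_true, if_false]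
      rw [ih (ind + 1) (c + 1) (by omega) (by omega)
        (by rw [hc1, hbal]; simp only [pvDelta, if_pos h1]; omega) (by omega), hc1]
    · by_cases h2 : tokens.getD c.toNat "" = b
      · have hd : pvDelta a b (tokens.getD c.toNat "") = -1 := by
          simp only [pvDelta, if_neg h1, if_pos h2]
        have hpb : (tokens.getD c.toNat "" == b) = true := by rw [h2]; simp
        simp only [if_neg h1, if_pos h2, hpb, Bool.true_and]
        by_cases h3 : ind - 1 = 0
        · have : decide (K + pvBal a b tokens (c.toNat + 1) = 0) = true := by
            rw [hbal, hd]; simp only [decide_eq_true_eq]; omega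
          simp only [if_pos h3, this, if_true]
          exact (Int.toNat_of_nonneg h0).symm
        · have : decide (K + pvBal a b tokens (c.toNat + 1) = 0) = false := by
            rw [hbal, hd]; simp only [decide_eq_false_iff_not]; omega
          simp only [if_neg h3, this, Bool.false_eq_true, if_false]
          rw [ih (ind - 1) (c + 1) (by omega) (by omega)
            (by rw [hc1, hbal, hd]; omega) (by omega), hc1]
      · have hd : pvDelta a b (tokens.getD c.toNat "") = 0 := by
          simp only [pvDelta, if_neg h1, if_neg h2]
        have hpb : (tokens.getD c.toNat "" == b) = false := by
          rw [beq_eq_false_iff_ne]; exact h2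
        simp only [if_neg h1, if_neg h2, hpb, Bool.false_and, Bool.false_eq_true, if_false]
        rw [ih ind (c + 1) (by omega) (by omega) (by rw [hc1, hbal, hd]; omega) (by omega), hc1]

-- invariant of the backward pass
lemma backPass_inv (tokens : List String) (s : Nat) (hs : s ≤ tokens.length) :
    (backPass tokens (prefs "(" ")" 0 tokens) (prefs "{" "}" 0 tokens) s).semi
        = pvOI (pvFirst tokens.length (pSemi tokens) s) ∧
    (∀ l, (backPass tokens (prefs "(" ")" 0 tokens) (prefs "{" "}" 0 tokens) s).mPar.getD l (-1)
        = pvOI (pvFirst tokens.length (pMatch "(" ")" tokens l) s)) ∧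
    (∀ l, (backPass tokens (prefs "(" ")" 0 tokens) (prefs "{" "}" 0 tokens) s).mBr.getD l (-1)
        = pvOI (pvFirst tokens.length (pMatch "{" "}" tokens l) s)) ∧
    (backPass tokens (prefs "(" ")" 0 tokens) (prefs "{" "}" 0 tokens) s).semis.reverse
        = (List.range' s (tokens.length - s)).map (fun j => pvOI (pvFirst tokens.length (pSemi tokens) j)) ∧
    (backPass tokens (prefs "(" ")" 0 tokens) (prefs "{" "}" 0 tokens) s).pars.reverse
        = (List.range' s (tokens.length - s)).map (fun j =>
            pvOI (pvFirst tokens.length (pMatch "(" ")" tokens (pvBal "(" ")" tokens j)) j)) ∧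
    (backPass tokens (prefs "(" ")" 0 tokens) (prefs "{" "}" 0 tokens) s).brs.reverse
        = (List.range' s (tokens.length - s)).map (fun j =>
            pvOI (pvFirst tokens.length (pMatch "{" "}" tokens (pvBal "{" "}" tokens j)) j)) := by
  induction hm : tokens.length - s generalizing s with
  | zero =>
    have hsn : s = tokens.length := by omega
    subst hsn
    rw [backPass, dif_neg (lt_irrefl _)]
    refine ⟨?_, fun l => ?_, fun l => ?_, ?_, ?_, ?_⟩ <;>
      simp [pvFirst_aux_none _ _ _ (le_refl tokens.length), pvOI, PySem.Dict.getD_empty]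
  | succ m ih =>
    have hlt : s < tokens.length := by omega
    obtain ⟨ihSemi, ihPar, ihBr, ihS, ihP, ihB⟩ := ih (s + 1) (by omega) (by omega)
    have hbalP1 : (prefs "(" ")" 0 tokens).getD (s + 1) 0 = pvBal "(" ")" tokens (s + 1) := by
      rw [prefs_getD "(" ")" (by decide) tokens 0 (s + 1) (by omega)]; ring
    have hbalP0 : (prefs "(" ")" 0 tokens).getD s 0 = pvBal "(" ")" tokens s := by
      rw [prefs_getD "(" ")" (by decide) tokens 0 s (by omega)]; ring
    have hbalB1 : (prefs "{" "}" 0 tokens).getD (s + 1) 0 = pvBal "{" "}" tokens (s + 1) := by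
      rw [prefs_getD "{" "}" (by decide) tokens 0 (s + 1) (by omega)]; ring
    have hbalB0 : (prefs "{" "}" 0 tokens).getD s 0 = pvBal "{" "}" tokens s := by
      rw [prefs_getD "{" "}" (by decide) tokens 0 s (by omega)]; ring
    have hSemi : (if tokens.getD s "" = ";" then (s : Int)
          else (backPass tokens (prefs "(" ")" 0 tokens) (prefs "{" "}" 0 tokens) (s + 1)).semi)
        = pvOI (pvFirst tokens.length (pSemi tokens) s) := by
      rw [pvFirst_eq, if_pos hlt]
      by_cases hxs : tokens.getD s "" = ";"
      · have hp : pSemi tokens s = true := by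
          simp only [pSemi, hxs, beq_self_eq_true]
        rw [if_pos hxs]
        simp only [hp, if_true, pvOI]
      · have hp : pSemi tokens s = false := by
          simp only [pSemi]; exact beq_eq_false_iff_ne.mpr hxs
        rw [if_neg hxs]
        simp only [hp, Bool.false_eq_true, if_false]
        exact ihSemi
    have hPar : ∀ l, (if tokens.getD s "" = ")" then
            (backPass tokens (prefs "(" ")" 0 tokens) (prefs "{" "}" 0 tokens) (s + 1)).mPar.insert
              ((prefs "(" ")" 0 tokens).getD (s + 1) 0) (s : Int)
          else (backPass tokens (prefs "(" ")" 0 tokens) (prefs "{" "}" 0 tokens) (s + 1)).mPar).getD l (-1)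
        = pvOI (pvFirst tokens.length (pMatch "(" ")" tokens l) s) := by
      intro l
      rw [pvFirst_eq, if_pos hlt]
      by_cases hxs : tokens.getD s "" = ")"
      · rw [if_pos hxs, hbalP1, PySem.Dict.getD_insert]
        by_cases hl : l = pvBal "(" ")" tokens (s + 1)
        · rw [if_pos hl]
          have hp : pMatch "(" ")" tokens l s = true := by
            simp only [pMatch, hxs, beq_self_eq_true, Bool.true_and, decide_eq_true_eq]
            exact hl.symm
          simp only [hp, if_true, pvOI]
        · rw [if_neg hl]
          have hp : pMatch "(" ")" tokens l s = false := by
            simp only [pMatch, hxs, beq_self_eq_true, Bool.true_and, decide_eq_false_iff_not]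
            exact fun h => hl h.symm
          simp only [hp, Bool.false_eq_true, if_false]
          exact ihPar l
      · rw [if_neg hxs]
        have hp : pMatch "(" ")" tokens l s = false := by
          simp only [pMatch, beq_eq_false_iff_ne.mpr hxs, Bool.false_and]
        simp only [hp, Bool.false_eq_true, if_false]
        exact ihPar l
    have hBr : ∀ l, (if tokens.getD s "" = "}" then
            (backPass tokens (prefs "(" ")" 0 tokens) (prefs "{" "}" 0 tokens) (s + 1)).mBr.insert
              ((prefs "{" "}" 0 tokens).getD (s + 1) 0) (s : Int)
          else (backPass tokens (prefs "(" ")" 0 tokens) (prefs "{" "}" 0 tokens) (s + 1)).mBr).getD l (-1)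
        = pvOI (pvFirst tokens.length (pMatch "{" "}" tokens l) s) := by
      intro l
      rw [pvFirst_eq, if_pos hlt]
      by_cases hxs : tokens.getD s "" = "}"
      · rw [if_pos hxs, hbalB1, PySem.Dict.getD_insert]
        by_cases hl : l = pvBal "{" "}" tokens (s + 1)
        · rw [if_pos hl]
          have hp : pMatch "{" "}" tokens l s = true := by
            simp only [pMatch, hxs, beq_self_eq_true, Bool.true_and, decide_eq_true_eq]
            exact hl.symm
          simp only [hp, if_true, pvOI]
        · rw [if_neg hl]
          have hp : pMatch "{" "}" tokens l s = false := by
            simp only [pMatch, hxs, beq_self_eq_true, Bool.true_and, decide_eq_false_iff_not]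
            exact fun h => hl h.symm
          simp only [hp, Bool.false_eq_true, if_false]
          exact ihBr l
      · rw [if_neg hxs]
        have hp : pMatch "{" "}" tokens l s = false := by
          simp only [pMatch, beq_eq_false_iff_ne.mpr hxs, Bool.false_and]
        simp only [hp, Bool.false_eq_true, if_false]
        exact ihBr l
    rw [backPass, dif_pos hlt]
    simp only [backStep]
    refine ⟨hSemi, hPar, hBr, ?_, ?_, ?_⟩
    · rw [List.range'_succ]
      simp only [List.reverse_append, List.reverse_cons, List.reverse_nil, List.nil_append,
        List.singleton_append, List.map_cons, ihS]
      exact congrArg (· :: _) hSemi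
    · rw [List.range'_succ]
      simp only [List.reverse_append, List.reverse_cons, List.reverse_nil, List.nil_append,
        List.singleton_append, List.map_cons, ihP]
      rw [hbalP0]
      exact congrArg (· :: _) (hPar (pvBal "(" ")" tokens s))
    · rw [List.range'_succ]
      simp only [List.reverse_append, List.reverse_cons, List.reverse_nil, List.nil_append,
        List.singleton_append, List.map_cons, ihB]
      rw [hbalB0]
      exact congrArg (· :: _) (hBr (pvBal "{" "}" tokens s))

-- B's suffix-array lookup: reading the reversed accumulator list with Python indexing
lemma lookup_eq (f : Nat → Int) (n : Nat) (c : Int) (h0 : 0 ≤ c) (hc : c ≤ (n : Int)) :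
    PySem.List.pyGetD ((List.range' 0 n).map f ++ [-1]) c (-1)
      = if c = (n : Int) then -1 else f c.toNat := by
  rw [PySem.List.pyGetD_of_nonneg _ _ h0, ← List.range_eq_range']
  by_cases hcn : c = (n : Int)
  · rw [if_pos hcn]
    have h1 : c.toNat = n := by omega
    rw [List.getD_eq_getElem?_getD, List.getElem?_append_right (by simp [h1]), h1]
    simp
  · rw [if_neg hcn]
    have h1 : c.toNat < n := by omega
    rw [List.getD_eq_getElem?_getD, List.getElem?_append_left (by simpa using h1)]
    rw [← List.getD_eq_getElem?_getD, PySem.List.getD_map_range _ _ _ _ h1]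

-- A's _go4match from start c, expressed through pvFirst and the pMatch predicate
lemma go4match_eq (tokens : List String) (a b : String) (hab : a ≠ b)
    (hfix : (if a = "(" then ")" else if a = "[" then "]" else if a = "{" then "}" else "") = b)
    (c : Int) (h0 : 0 ≤ c) (hc : c < (tokens.length : Int)) :
    go4match tokens a c
      = (match pvFirst tokens.length (pMatch a b tokens (pvBal a b tokens c.toNat)) c.toNat with
         | some j => (j : Int)
         | none => c + 1) := by
  unfold go4match
  dsimp only
  rw [hfix]
  rw [go4matchLoop_eq tokens a b hab (-(pvBal a b tokens c.toNat)) 0 c h0 (by omega) (by omega)]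
  rw [pvFirst_congr tokens.length _ (pMatch a b tokens (pvBal a b tokens c.toNat)) c.toNat
    (fun j => by
      simp only [pMatch]
      congr 1
      exact decide_eq_decide.mpr (by constructor <;> intro h <;> omega))]
  cases hres : pvFirst tokens.length (pMatch a b tokens (pvBal a b tokens c.toNat)) c.toNat with
  | some j =>
    have hb := pvFirst_some_bounds _ _ _ _ hres
    simp only
    rw [if_neg (by exact_mod_cast Nat.ne_of_lt hb.2.1)]
  | none =>
    rw [if_pos rfl]
    exact min_eq_left (by omega)

-- ===== VERDICT (by name: the statement is the Claim_ definition above) =====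
theorem For2WhileReplacePos_spec : Claim_equal_For2WhileReplacePos := by
  intro tokens endPoses _hDom _hPre
  unfold Spec_For2WhileReplacePos For2WhileReplacePos For2WhileReplacePos_alt
  apply PySem.List.foldl_congr_mem
  intro acc it hit
  obtain ⟨k, hk, rfl⟩ := (PySem.List.mem_enumerate_iff _ _ _).1 hit
  simp only [zero_add]
  by_cases hf : tokens[k] = "for"
  · rw [if_pos hf, if_pos hf]
    obtain ⟨_, _, _, hS, hP, hB⟩ := backPass_inv tokens 0 (Nat.zero_le _)
    rw [Nat.sub_zero] at hS hP hB
    have hk0 : (0 : Int) ≤ (k : Int) := by positivity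
    have hkn : (k : Int) ≤ (tokens.length : Int) := by exact_mod_cast hk.le
    have hkln : (k : Int) < (tokens.length : Int) := by exact_mod_cast hk
    -- condition-1 semicolon
    have hA_c1 : go4next tokens ";" (k : Int) = pvOI (pvFirst tokens.length (pSemi tokens) k) := by
      rw [go4next_eq tokens ";" (k : Int) hk0 hkn, Int.toNat_natCast]
      exact congrArg pvOI (pvFirst_congr _ _ _ _ (fun j => rfl))
    have hB_c1 :
        PySem.List.pyGetD
          ((backPass tokens (prefs "(" ")" 0 tokens) (prefs "{" "}" 0 tokens) 0).semis.reverse ++ [-1])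
          (k : Int) (-1) = pvOI (pvFirst tokens.length (pSemi tokens) k) := by
      rw [hS, lookup_eq _ tokens.length (k : Int) hk0 hkn,
        if_neg (by exact_mod_cast Nat.ne_of_lt hk), Int.toNat_natCast]
    -- condition-2 semicolon (restart after the first one)
    have hm1b : pvOI (pvFirst tokens.length (pSemi tokens) k) = -1 ∨
        (0 ≤ pvOI (pvFirst tokens.length (pSemi tokens) k) ∧
         pvOI (pvFirst tokens.length (pSemi tokens) k) < (tokens.length : Int)) := by
      cases hres : pvFirst tokens.length (pSemi tokens) k with
      | some j =>
        have hb := pvFirst_some_bounds _ _ _ _ hres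
        right; constructor
        · simp [pvOI]
        · simp only [pvOI]; exact_mod_cast hb.2.1
      | none => left; rfl
    have hA_c2 : go4next tokens ";" (pvOI (pvFirst tokens.length (pSemi tokens) k) + 1)
        = pvOI (pvFirst tokens.length (pSemi tokens)
            (pvOI (pvFirst tokens.length (pSemi tokens) k) + 1).toNat) := by
      rw [go4next_eq tokens ";" _ (by rcases hm1b with h | h <;> omega)
        (by rcases hm1b with h | h <;> omega)]
      exact congrArg pvOI (pvFirst_congr _ _ _ _ (fun j => rfl))
    have hB_c2 :
        PySem.List.pyGetD
          ((backPass tokens (prefs "(" ")" 0 tokens) (prefs "{" "}" 0 tokens) 0).semis.reverse ++ [-1])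
          (pvOI (pvFirst tokens.length (pSemi tokens) k) + 1) (-1)
        = pvOI (pvFirst tokens.length (pSemi tokens)
            (pvOI (pvFirst tokens.length (pSemi tokens) k) + 1).toNat) := by
      rw [hS, lookup_eq _ tokens.length _ (by rcases hm1b with h | h <;> omega)
        (by rcases hm1b with h | h <;> omega)]
      by_cases hcn : pvOI (pvFirst tokens.length (pSemi tokens) k) + 1 = (tokens.length : Int)
      · rw [if_pos hcn, pvFirst_aux_none _ _ _ (by omega)]
        rfl
      · rw [if_neg hcn]
    -- condition end: the matching ")"
    have hA_cE : go4match tokens "(" (k : Int)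
        = (match pvFirst tokens.length (pMatch "(" ")" tokens (pvBal "(" ")" tokens k)) k with
           | some j => (j : Int)
           | none => (k : Int) + 1) := by
      rw [go4match_eq tokens "(" ")" (by decide) (by decide) (k : Int) hk0 hkln, Int.toNat_natCast]
    have hB_cE :
        (if PySem.List.pyGetD
            ((backPass tokens (prefs "(" ")" 0 tokens) (prefs "{" "}" 0 tokens) 0).pars.reverse ++ [-1])
            (k : Int) (-1) = -1
         then (k : Int) + 1
         else PySem.List.pyGetD
            ((backPass tokens (prefs "(" ")" 0 tokens) (prefs "{" "}" 0 tokens) 0).pars.reverse ++ [-1])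
            (k : Int) (-1))
        = (match pvFirst tokens.length (pMatch "(" ")" tokens (pvBal "(" ")" tokens k)) k with
           | some j => (j : Int)
           | none => (k : Int) + 1) := by
      have hlk : PySem.List.pyGetD
          ((backPass tokens (prefs "(" ")" 0 tokens) (prefs "{" "}" 0 tokens) 0).pars.reverse ++ [-1])
          (k : Int) (-1)
          = pvOI (pvFirst tokens.length (pMatch "(" ")" tokens (pvBal "(" ")" tokens k)) k) := by
        rw [hP, lookup_eq _ tokens.length (k : Int) hk0 hkn,
          if_neg (by exact_mod_cast Nat.ne_of_lt hk), Int.toNat_natCast]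
      rw [hlk]
      cases hres : pvFirst tokens.length (pMatch "(" ")" tokens (pvBal "(" ")" tokens k)) k with
      | some j => simp only [pvOI]; rw [if_neg (by omega)]
      | none => simp [pvOI]
    rw [hA_c1, hB_c1, hA_c2, hB_c2, hA_cE, hB_cE]
    -- block end: brace lookup or endPoses
    have hcEb : 0 ≤ (match pvFirst tokens.length (pMatch "(" ")" tokens (pvBal "(" ")" tokens k)) k with
           | some j => (j : Int)
           | none => (k : Int) + 1) ∧
        (match pvFirst tokens.length (pMatch "(" ")" tokens (pvBal "(" ")" tokens k)) k with
           | some j => (j : Int)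
           | none => (k : Int) + 1) ≤ (tokens.length : Int) := by
      cases hres : pvFirst tokens.length (pMatch "(" ")" tokens (pvBal "(" ")" tokens k)) k with
      | some j =>
        have hb := pvFirst_some_bounds _ _ _ _ hres
        have hj : (j : Int) < (tokens.length : Int) := by exact_mod_cast hb.2.1
        dsimp only
        omega
      | none =>
        dsimp only
        show 0 ≤ (k : Int) + 1 ∧ (k : Int) + 1 ≤ (tokens.length : Int)
        omega
    set cEv : Int := (match pvFirst tokens.length (pMatch "(" ")" tokens (pvBal "(" ")" tokens k)) k with
           | some j => (j : Int)
           | none => (k : Int) + 1) with hcEv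
    by_cases hbr : PySem.List.pyGetD tokens (cEv + 1) "" = "{"
    · rw [if_pos hbr, if_pos hbr]
      have hlt2 : cEv + 1 < (tokens.length : Int) := by
        by_contra hge
        rw [PySem.List.pyGetD_of_nonneg _ _ (by omega),
          List.getD_eq_default _ _ (by omega)] at hbr
        exact absurd hbr (by decide)
      have hA_bE : go4match tokens "{" cEv
          = (match pvFirst tokens.length
                (pMatch "{" "}" tokens (pvBal "{" "}" tokens cEv.toNat)) cEv.toNat with
             | some j => (j : Int)
             | none => cEv + 1) := by
        rw [go4match_eq tokens "{" "}" (by decide) (by decide) cEv hcEb.1 (by omega)]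
      have hB_bE :
          (if PySem.List.pyGetD
              ((backPass tokens (prefs "(" ")" 0 tokens) (prefs "{" "}" 0 tokens) 0).brs.reverse ++ [-1])
              cEv (-1) = -1
           then cEv + 1
           else PySem.List.pyGetD
              ((backPass tokens (prefs "(" ")" 0 tokens) (prefs "{" "}" 0 tokens) 0).brs.reverse ++ [-1])
              cEv (-1))
          = (match pvFirst tokens.length
                (pMatch "{" "}" tokens (pvBal "{" "}" tokens cEv.toNat)) cEv.toNat with
             | some j => (j : Int)
             | none => cEv + 1) := by
        have hlk2 : PySem.List.pyGetD
            ((backPass tokens (prefs "(" ")" 0 tokens) (prefs "{" "}" 0 tokens) 0).brs.reverse ++ [-1])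
            cEv (-1)
            = pvOI (pvFirst tokens.length
                (pMatch "{" "}" tokens (pvBal "{" "}" tokens cEv.toNat)) cEv.toNat) := by
          rw [hB, lookup_eq _ tokens.length cEv hcEb.1 hcEb.2, if_neg (by omega)]
        rw [hlk2]
        cases hres : pvFirst tokens.length
            (pMatch "{" "}" tokens (pvBal "{" "}" tokens cEv.toNat)) cEv.toNat with
        | some j => simp only [pvOI]; rw [if_neg (by omega)]
        | none => simp [pvOI]
      rw [hA_bE, hB_bE]
    · rw [if_neg hbr, if_neg hbr]
  · rw [if_neg hf, if_neg hf]
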